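-- pv_equiv track=rewrite | github.com/ncduy0303/advent-of-code | 2025/6/solve.py | calculate_aligned_column_results
-- ===== SOURCE A (Python) =====
-- from typing import List
--
-- def apply_operator(a: int, b: int, operator: str) -> int:
--     if operator == '+':
--         return a + b
--     elif operator == '*':
--         return a * b
--     else:
--         raise ValueError(f"Unknown operator: {operator}")
--
-- def calculate_aligned_column_results(matrix_str: List[str], operators_str: str) -> int:
--     total = 0
--     idx = 0
--     cur = 0
--     operator = None
--     while idx < len(operators_str):
--         if operators_str[idx] != ' ':
--             total += cur
--             operator = operators_str[idx]
--             cur = 0 if operator == '+' else 1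
--         num = None
--         for row in matrix_str:
--             if row[idx] == ' ':
--                 continue
--             digit = int(row[idx])
--             num = num * 10 + digit if num is not None else digit
--         assert operator is not None
--         if num is not None:
--             cur = apply_operator(cur, num, operator)
--         idx += 1
--     total += cur
--     return total
-- ===== SOURCE B (Python) =====
-- from typing import List, Optional
--
-- def apply_operator(a: int, b: int, operator: str) -> int:
--     if operator == '+':
--         return a + b
--     elif operator == '*':
--         return a * b
--     else:
--         raise ValueError(f"Unknown operator: {operator}")
--
-- def column_number(matrix_str: List[str], idx: int) -> Optional[int]:
--     num = None
--     for row in matrix_str: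
--         if row[idx] == ' ':
--             continue
--         digit = int(row[idx])
--         num = num * 10 + digit if num is not None else digit
--     return num
--
-- def calculate_aligned_column_results(matrix_str: List[str], operators_str: str) -> int:
--     n = len(operators_str)
--     nums = [column_number(matrix_str, i) for i in range(n)]
--     total = 0
--     i = 0
--     while i < n:
--         op = operators_str[i]
--         acc = 0 if op == '+' else 1
--         j = i
--         while j < n and (j == i or operators_str[j] == ' '):
--             if nums[j] is not None:
--                 acc = apply_operator(acc, nums[j], op)
--             j += 1
--         total += acc
--         i = j
--     return total
-- ===== Notes on version B (the rewrite author's own statement) =====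
-- stated objective: alternative
-- what changed: B precomputes each column's number once into a nums list and then processes the operator string segment by segment (outer loop per operator position, inner loop walking to the next operator), instead of A's single left-to-right pass carrying running operator/accumulator state.
import Mathlib
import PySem

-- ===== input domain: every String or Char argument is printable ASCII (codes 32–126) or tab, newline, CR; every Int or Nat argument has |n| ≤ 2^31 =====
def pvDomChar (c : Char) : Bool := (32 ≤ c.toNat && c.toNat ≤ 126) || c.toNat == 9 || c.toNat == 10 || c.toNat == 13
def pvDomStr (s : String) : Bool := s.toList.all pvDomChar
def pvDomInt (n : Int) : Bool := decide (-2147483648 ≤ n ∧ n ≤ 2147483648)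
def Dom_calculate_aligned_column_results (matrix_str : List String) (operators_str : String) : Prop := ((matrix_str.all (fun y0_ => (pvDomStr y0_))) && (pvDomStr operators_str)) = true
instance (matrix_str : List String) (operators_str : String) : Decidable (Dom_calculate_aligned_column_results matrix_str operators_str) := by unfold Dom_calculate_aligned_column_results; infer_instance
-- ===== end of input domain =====

-- B restructures A's single stateful pass into: precompute per-column numbers, then an outer loop per operator
-- segment with an inner walk to the next operator (objective: alternative decomposition, same cost).


-- ===== PORT A =====
-- apply_operator (shared helper of Source A and Source B); 'else' raises ValueError — Pre_ keeps that branch unreached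
def applyOp (a b : Int) (operator : Char) : Int :=
  if operator = '+' then a + b
  else if operator = '*' then a * b
  else a

-- A's inner 'for row in matrix_str' loop reading column idx (Source B's column_number is the same code).
-- row[idx] out of range = IndexError, int(non-digit char) = ValueError: both yield 'num unchanged' here
-- and are excluded by Pre_.  int(single ASCII digit char c) = c - '0', exact on the ASCII domain.
def colNum (matrix_str : List String) (idx : Nat) : Option Int :=
  matrix_str.foldl (fun num row =>
    match row.toList[idx]? with
    | none => num
    | some c =>
      if c = ' ' then num
      else if c.isDigit then
        some (match num with
              | some m => m * 10 + ((c.toNat : Int) - 48)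
              | none => ((c.toNat : Int) - 48))
      else num) none

-- A's while loop, one step per remaining operator char; 'op = none' past the first column means the
-- Python assert fails (AssertionError) — Pre_ excludes it, the port leaves cur unchanged there.
def loopA (matrix_str : List String) (rest : List Char) (idx : Nat) (total cur : Int) (op : Option Char) : Int :=
  match rest with
  | [] => total + cur
  | c :: rest' =>
    let total' := if c = ' ' then total else total + cur
    let op'    := if c = ' ' then op else some c
    let cur'   := if c = ' ' then cur else if c = '+' then (0:Int) else 1
    let cur''  := match colNum matrix_str idx with
                  | some v => (match op' with
                               | some o2 => applyOp cur' v o2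
                               | none => cur')
                  | none   => cur'
    loopA matrix_str rest' (idx+1) total' cur'' op'

def calculate_aligned_column_results (matrix_str : List String) (operators_str : String) : Int :=
  loopA matrix_str operators_str.toList 0 0 0 none

-- ===== PORT B =====
-- Source B's inner while: walk from j over the segment that started at 'start', folding the precomputed
-- column numbers into acc; returns (acc, next operator position).  The while loop is ported with an
-- explicit fuel counter (L.length - j bounds the remaining iterations; the loop stops by itself when
-- j reaches L.length, so any fuel ≥ L.length - j computes the loop's value).
def innerB (nums : List (Option Int)) (L : List Char) (o : Char) (start : Nat) :
    Nat → Nat → Int → Int × Nat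
  | 0, j, acc => (acc, j)
  | fuel+1, j, acc =>
    if j < L.length ∧ (j = start ∨ L.getD j ' ' = ' ') then
      innerB nums L o start fuel (j+1)
        (match nums.getD j none with
         | some v => applyOp acc v o
         | none => acc)
    else (acc, j)

-- Source B's outer while over operator positions, same fuel discipline (i strictly increases each pass)
def outerB (nums : List (Option Int)) (L : List Char) : Nat → Nat → Int → Int
  | 0, _, total => total
  | fuel+1, i, total =>
    if i < L.length then
      outerB nums L fuel
        (innerB nums L (L.getD i ' ') i (L.length - i) i (if L.getD i ' ' = '+' then (0:Int) else 1)).2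
        (total + (innerB nums L (L.getD i ' ') i (L.length - i) i (if L.getD i ' ' = '+' then (0:Int) else 1)).1)
    else total

def calculate_aligned_column_results_alt (matrix_str : List String) (operators_str : String) : Int :=
  outerB ((List.range operators_str.toList.length).map (fun i => colNum matrix_str i))
    operators_str.toList operators_str.toList.length 0 0

-- ===== PRECONDITION & SPEC =====
-- Pre_ excludes exactly the inputs on which A raises: a leading space in operators_str
-- (AssertionError), a row shorter than operators_str (IndexError), a non-digit non-space matrix
-- char in a read column (ValueError from int), and a non-space operator char other than '+'/'*'
-- whose segment contains a non-blank column (ValueError from apply_operator).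
def Pre_calculate_aligned_column_results (matrix_str : List String) (operators_str : String) : Prop :=
  ((operators_str.toList.take 1).all (fun c => c != ' ')
   && matrix_str.all (fun row => decide (operators_str.toList.length ≤ row.toList.length)
        && (List.range operators_str.toList.length).all
             (fun i => row.toList.getD i ' ' == ' ' || (row.toList.getD i ' ').isDigit))
   && (List.range operators_str.toList.length).all (fun i =>
        (operators_str.toList.getD i ' ' == ' ' || operators_str.toList.getD i ' ' == '+'
          || operators_str.toList.getD i ' ' == '*')
        || (List.range operators_str.toList.length).all (fun j =>
             !(decide (i ≤ j)
               && (List.range (j - i)).all (fun t => operators_str.toList.getD (i+1+t) ' ' == ' '))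
             || matrix_str.all (fun row => row.toList.getD j ' ' == ' ')))) = true
instance (matrix_str : List String) (operators_str : String) : Decidable (Pre_calculate_aligned_column_results matrix_str operators_str) := by unfold Pre_calculate_aligned_column_results; infer_instance

def pvWitness_calculate_aligned_column_results : List String × String := (["12", "3 "], "+ ")

def Spec_calculate_aligned_column_results (matrix_str : List String) (operators_str : String) (out : Int) : Prop := out = calculate_aligned_column_results_alt matrix_str operators_str
instance (matrix_str : List String) (operators_str : String) (out : Int) : Decidable (Spec_calculate_aligned_column_results matrix_str operators_str out) := by unfold Spec_calculate_aligned_column_results; infer_instance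

-- ===== CLAIM (what is proved, stated in full; the proofs are below) =====
def Claim_equal_calculate_aligned_column_results : Prop := ∀ (matrix_str : List String) (operators_str : String), Dom_calculate_aligned_column_results matrix_str operators_str → Pre_calculate_aligned_column_results matrix_str operators_str → Spec_calculate_aligned_column_results matrix_str operators_str (calculate_aligned_column_results matrix_str operators_str)

-- ===== LEMMAS AND PROOFS =====

-- basic facts about the fuelled loops
theorem innerB_stop (nums : List (Option Int)) (L : List Char) (o : Char) (start : Nat) :
    ∀ (k j : Nat) (acc : Int), L.length ≤ j → innerB nums L o start k j acc = (acc, j) := by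
  intro k
  cases k with
  | zero => intro j acc _; rfl
  | succ k => intro j acc h; rw [innerB, if_neg (by rintro ⟨hx, -⟩; omega)]

theorem innerB_le (nums : List (Option Int)) (L : List Char) (o : Char) :
    ∀ (k start j : Nat) (acc : Int), j ≤ (innerB nums L o start k j acc).2 := by
  intro k
  induction k with
  | zero => intro start j acc; exact Nat.le_refl _
  | succ k ih =>
    intro start j acc
    rw [innerB]
    split
    · exact Nat.le_trans (by omega) (ih start (j+1) _)
    · exact Nat.le_refl _

theorem innerB_snd_gt (nums : List (Option Int)) (L : List Char) (o : Char) (start k : Nat)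
    (acc : Int) (hk : 0 < k) (h : start < L.length) :
    start < (innerB nums L o start k start acc).2 := by
  cases k with
  | zero => omega
  | succ k =>
    rw [innerB, if_pos ⟨h, Or.inl rfl⟩]
    have := innerB_le nums L o k start (start+1)
      (match nums.getD start none with | some v => applyOp acc v o | none => acc)
    omega

-- neither the fuel (as long as it suffices) nor a 'start' the walk has already passed
-- (or that lies beyond L) affects the inner walk's result
theorem innerB_congr (nums : List (Option Int)) (L : List Char) (o : Char) :
    ∀ (k1 k2 start1 start2 j : Nat) (acc : Int),
      L.length - j ≤ k1 → L.length - j ≤ k2 →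
      (start1 < j ∨ L.length ≤ start1) → (start2 < j ∨ L.length ≤ start2) →
      innerB nums L o start1 k1 j acc = innerB nums L o start2 k2 j acc := by
  intro k1
  induction k1 with
  | zero =>
    intro k2 start1 start2 j acc hk1 hk2 hs1 hs2
    rw [innerB_stop nums L o start1 0 j acc (by omega),
        innerB_stop nums L o start2 k2 j acc (by omega)]
  | succ k1 ih =>
    intro k2 start1 start2 j acc hk1 hk2 hs1 hs2
    by_cases hj : j < L.length
    · cases k2 with
      | zero => exact absurd hj (by omega)
      | succ k2 =>
        by_cases hsp : L.getD j ' ' = ' '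
        · rw [innerB, if_pos ⟨hj, Or.inr hsp⟩]
          conv_rhs => rw [innerB, if_pos ⟨hj, Or.inr hsp⟩]
          exact ih k2 start1 start2 (j+1) _ (by omega) (by omega) (by omega) (by omega)
        · rw [innerB, if_neg (by rintro ⟨-, h | h⟩ <;> first | exact hsp h | omega)]
          conv_rhs => rw [innerB, if_neg (by rintro ⟨-, h | h⟩ <;> first | exact hsp h | omega)]
    · rw [innerB_stop nums L o start1 _ j acc (by omega),
          innerB_stop nums L o start2 _ j acc (by omega)]

theorem outerB_stop (nums : List (Option Int)) (L : List Char) :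
    ∀ (k i : Nat) (t : Int), L.length ≤ i → outerB nums L k i t = t := by
  intro k
  cases k with
  | zero => intro i t _; rfl
  | succ k => intro i t h; rw [outerB, if_neg (by omega)]

-- the outer loop's running total is a pure offset
theorem outerB_shift (nums : List (Option Int)) (L : List Char) :
    ∀ (k i : Nat) (t : Int), outerB nums L k i t = t + outerB nums L k i 0 := by
  intro k
  induction k with
  | zero => intro i t; show t = t + 0; omega
  | succ k ih =>
    intro i t
    by_cases hi : i < L.length
    · rw [outerB, if_pos hi]
      conv_rhs => rw [outerB, if_pos hi]
      rw [ih _ (t + _), ih _ (0 + _)]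
      omega
    · rw [outerB_stop nums L _ i t (by omega), outerB_stop nums L _ i 0 (by omega)]
      omega

-- sufficient fuel is all that matters for the outer loop
theorem outerB_congr (nums : List (Option Int)) (L : List Char) :
    ∀ (k1 k2 i : Nat) (t : Int), L.length - i ≤ k1 → L.length - i ≤ k2 →
      outerB nums L k1 i t = outerB nums L k2 i t := by
  intro k1
  induction k1 with
  | zero =>
    intro k2 i t hk1 hk2
    rw [outerB_stop nums L 0 i t (by omega), outerB_stop nums L k2 i t (by omega)]
  | succ k1 ih =>
    intro k2 i t hk1 hk2
    by_cases hi : i < L.length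
    · cases k2 with
      | zero => exact absurd hi (by omega)
      | succ k2 =>
        rw [outerB, if_pos hi]
        conv_rhs => rw [outerB, if_pos hi]
        have hgt := innerB_snd_gt nums L (L.getD i ' ') i (L.length - i)
          (if L.getD i ' ' = '+' then (0:Int) else 1) (by omega) hi
        exact ih k2 _ _ (by omega) (by omega)
    · rw [outerB_stop nums L _ i t (by omega), outerB_stop nums L _ i t (by omega)]

-- the main invariant: A's loop from column idx, mid-segment with accumulator cur and operator o,
-- computes total + (finish the current segment) + (B's outer loop over the remaining segments)
theorem loopA_eq (m : List String) (L : List Char) :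
    ∀ (k idx : Nat) (total cur : Int) (o : Char), L.length - idx ≤ k →
      loopA m (L.drop idx) idx total cur (some o) =
        total + (innerB ((List.range L.length).map (fun i => colNum m i)) L o L.length (L.length - idx) idx cur).1
              + outerB ((List.range L.length).map (fun i => colNum m i)) L
                  (L.length - (innerB ((List.range L.length).map (fun i => colNum m i)) L o L.length (L.length - idx) idx cur).2)
                  (innerB ((List.range L.length).map (fun i => colNum m i)) L o L.length (L.length - idx) idx cur).2 0 := by
  intro k
  induction k with
  | zero =>
    intro idx total cur o hk
    rw [List.drop_eq_nil_of_le (by omega)]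
    rw [innerB_stop _ _ _ _ _ idx cur (by omega)]
    rw [outerB_stop _ _ _ idx 0 (by omega)]
    show total + cur = total + cur + 0
    omega
  | succ k ih =>
    intro idx total cur o hk
    by_cases hidx : idx < L.length
    · have hgetD : L.getD idx ' ' = L[idx] := List.getD_eq_getElem L ' ' hidx
      have hnums : ((List.range L.length).map (fun i => colNum m i)).getD idx none = colNum m idx :=
        PySem.List.getD_map_range _ _ _ none hidx
      rw [List.drop_eq_getElem_cons hidx]
      rw [show L.length - idx = (L.length - (idx+1)) + 1 from by omega]
      by_cases hc : L[idx] = ' '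
      · -- space column: continue the current segment
        conv_lhs => rw [loopA]
        conv_rhs => rw [innerB]
        rw [if_pos (show idx < L.length ∧ (idx = L.length ∨ L.getD idx ' ' = ' ') from ⟨hidx, Or.inr (hgetD.trans hc)⟩), hnums]
        simp only [hc, reduceIte]
        exact ih (idx+1) total (match colNum m idx with
          | some v => applyOp cur v o
          | none => cur) o (by omega)
      · -- operator column: A closes the segment; B's inner walk stops, the outer loop restarts it
        conv_lhs => rw [loopA]
        conv_rhs => rw [innerB]
        rw [if_neg (show ¬(idx < L.length ∧ (idx = L.length ∨ L.getD idx ' ' = ' ')) from by rintro ⟨-, h | h⟩ <;> first | exact hc (hgetD.symm.trans h) | omega)]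
        rw [show ((cur, idx) : Int × Nat).2 = idx from rfl,
            show ((cur, idx) : Int × Nat).1 = cur from rfl]
        rw [show L.length - idx = (L.length - (idx+1)) + 1 from by omega]
        conv_rhs => rw [outerB]
        rw [if_pos hidx, hgetD]
        rw [show L.length - idx = (L.length - (idx+1)) + 1 from by omega]
        conv_rhs => rw [innerB]
        rw [if_pos (show idx < L.length ∧ (idx = idx ∨ L.getD idx ' ' = ' ') from ⟨hidx, Or.inl rfl⟩), hnums]
        rw [innerB_congr ((List.range L.length).map (fun i => colNum m i)) L (L[idx])
              (L.length - (idx+1)) (L.length - (idx+1)) idx L.length (idx+1) _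
              (by omega) (by omega) (by omega) (by omega)]
        rw [outerB_shift]
        have hle := innerB_le ((List.range L.length).map (fun i => colNum m i)) L (L[idx])
          (L.length - (idx+1)) L.length (idx+1)
          (match colNum m idx with
           | some v => applyOp (if L[idx] = '+' then (0:Int) else 1) v (L[idx])
           | none => (if L[idx] = '+' then (0:Int) else 1))
        rw [outerB_congr ((List.range L.length).map (fun i => colNum m i)) L
              (L.length - (idx+1)) (L.length - (innerB ((List.range L.length).map (fun i => colNum m i)) L (L[idx]) L.length (L.length - (idx+1)) (idx+1)
                (match colNum m idx with
                 | some v => applyOp (if L[idx] = '+' then (0:Int) else 1) v (L[idx])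
                 | none => (if L[idx] = '+' then (0:Int) else 1))).2) _ 0
              (by omega) (by omega)]
        simp only [hc, reduceIte]
        have h1 := ih (idx+1) (total + cur) (match colNum m idx with
          | some v => applyOp (if L[idx] = '+' then (0:Int) else 1) v (L[idx])
          | none => (if L[idx] = '+' then (0:Int) else 1)) (L[idx]) (by omega)
        rw [h1]
        omega
    · rw [List.drop_eq_nil_of_le (by omega)]
      rw [innerB_stop _ _ _ _ _ idx cur (by omega)]
      rw [outerB_stop _ _ _ idx 0 (by omega)]
      show total + cur = total + cur + 0
      omega

-- ===== VERDICT (by name: the statement is the Claim_ definition above) =====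
theorem calculate_aligned_column_results_spec : Claim_equal_calculate_aligned_column_results := by
  intro m ops hdom hpre
  unfold Spec_calculate_aligned_column_results calculate_aligned_column_results
    calculate_aligned_column_results_alt
  unfold Pre_calculate_aligned_column_results at hpre
  have h1 : ∀ c ∈ ops.toList.take 1, c ≠ ' ' := by
    simp only [Bool.and_eq_true, List.all_eq_true, bne_iff_ne] at hpre
    exact hpre.1.1
  cases hL : ops.toList with
  | nil =>
    show (0:Int) + 0 = 0
    omega
  | cons c rest =>
    have hc : c ≠ ' ' := h1 c (by rw [hL]; simp)
    have hlen : 0 < (c :: rest).length := by simp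
    conv_lhs => rw [loopA]
    simp only [if_neg hc]
    conv_lhs => rw [show rest = (c :: rest).drop 1 from rfl]
    rw [loopA_eq m (c :: rest) (c :: rest).length 1 (0 + 0) _ c (by omega)]
    simp only [List.length_cons]
    conv_rhs => rw [outerB]
    simp only [List.length_cons]
    rw [if_pos (show (0:Nat) < rest.length + 1 from by omega)]
    simp only [List.getD_cons_zero, Nat.sub_zero]
    conv_rhs => rw [innerB]
    rw [if_pos (show 0 < (c :: rest).length ∧ ((0:Nat) = 0 ∨ (c :: rest).getD 0 ' ' = ' ') from ⟨by simp, Or.inl rfl⟩)]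
    rw [PySem.List.getD_map_range _ _ 0 none (by omega)]
    simp only [Nat.zero_add]
    rw [innerB_congr ((List.range (rest.length + 1)).map (fun i => colNum m i)) (c :: rest) c
          (rest.length + 1 - 1) rest.length (rest.length + 1) 0 1
          (match colNum m 0 with
           | some v => applyOp (if c = '+' then (0:Int) else 1) v c
           | none => if c = '+' then (0:Int) else 1)
          (by simp only [List.length_cons]; omega) (by simp only [List.length_cons]; omega)
          (by simp only [List.length_cons]; omega) (by omega)]
    have hle := innerB_le ((List.range (rest.length + 1)).map (fun i => colNum m i)) (c :: rest) c
      rest.length 0 1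
      (match colNum m 0 with
       | some v => applyOp (if c = '+' then (0:Int) else 1) v c
       | none => if c = '+' then (0:Int) else 1)
    conv_rhs => rw [outerB_shift]
    rw [outerB_congr ((List.range (rest.length + 1)).map (fun i => colNum m i)) (c :: rest)
          rest.length ((c :: rest).length -
            (innerB ((List.range (rest.length + 1)).map (fun i => colNum m i)) (c :: rest) c 0 rest.length 1
              (match colNum m 0 with
               | some v => applyOp (if c = '+' then (0:Int) else 1) v c
               | none => if c = '+' then (0:Int) else 1)).2)
          (innerB ((List.range (rest.length + 1)).map (fun i => colNum m i)) (c :: rest) c 0 rest.length 1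
              (match colNum m 0 with
               | some v => applyOp (if c = '+' then (0:Int) else 1) v c
               | none => if c = '+' then (0:Int) else 1)).2 0
          (by simp only [List.length_cons]; omega) (by simp only [List.length_cons]; omega)]
    simp only [List.length_cons]
    omega
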